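-- pv_equiv track=rewrite | github.com/wherby/code | contest/00000c490d177/c498/q4/t4.py | countGoodIntegersOnPath
-- ===== SOURCE A (Python) =====
-- from functools import cache
--
-- def countGoodIntegersOnPath(l: int, r: int, directions: str) -> int:
--     cx,cy = 0,0
--     pos = [0]
--     for m in directions:
--         if m == "D":
--             cx +=1
--         else:
--             cy += 1
--         pos.append(cx*4+cy)
--     pos = set(pos)
--     def count(n):
--         nstr = str(n)
--         nstr = "0"*(16-len(nstr)) + nstr
--         nls = [int(a) for a in nstr]
--
--         @cache
--         def dp(idx,lstV,isLimit):
--             if idx == 16: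
--                 return 1
--             res = 0
--             up = nls[idx] if isLimit else 9
--             for d in range(up+1):
--                 if idx in pos:
--                     if d >=lstV:
--                         res += dp(idx+1,d,isLimit and (d == up))
--                 else:
--                     res += dp(idx + 1, lstV, isLimit and (d == up))
--             return res
--         res = dp(0,0,True)
--         dp.cache_clear()
--         return res
--     return count(r) - count(l-1)
-- ===== SOURCE B (Python) =====
-- def countGoodIntegersOnPath(l: int, r: int, directions: str) -> int:
--     # bottom-up suffix tables + one tight left-to-right walk (no memoized recursion)
--     cx, cy = 0, 0
--     pos = {0}
--     for m in directions:
--         if m == "D":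
--             cx += 1
--         else:
--             cy += 1
--         pos.add(cx * 4 + cy)
--
--     def count(n):
--         nstr = str(n)
--         nstr = "0" * (16 - len(nstr)) + nstr
--         digs = [int(a) for a in nstr]
--         # tables[i][v] = completions of positions i..15 with last kept value v, digits free
--         free = [1] * 10
--         tables = [free]
--         for i in range(15, -1, -1):
--             if i in pos:
--                 new = []
--                 acc = 0
--                 for x in reversed(free):
--                     acc += x
--                     new.append(acc)
--                 new.reverse()
--             else:
--                 new = [10 * x for x in free]
--             free = new
--             tables.append(free)
--         tables.reverse()
--
--         def scan(i, v):
--             # count of good numbers <= n among those sharing the first i digits (tight), last kept value v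
--             if i == 16:
--                 return 1
--             d = digs[i]
--             if i not in pos:
--                 return d * tables[i + 1][v] + scan(i + 1, v)
--             t = sum(tables[i + 1][e] for e in range(v, d))
--             return t if d < v else t + scan(i + 1, d)
--
--         return scan(0, 0)
--
--     return count(r) - count(l - 1)
-- ===== Notes on version B (the rewrite author's own statement) =====
-- stated objective: alternative
-- what changed: Replaces the memoized top-down dp(idx,lastValue,isLimit) digit-DP recursion (rebuilt and cache-cleared per query) by a bottom-up table of suffix completion counts plus a single left-to-right walk along the tight prefix of n.
import Mathlib
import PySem

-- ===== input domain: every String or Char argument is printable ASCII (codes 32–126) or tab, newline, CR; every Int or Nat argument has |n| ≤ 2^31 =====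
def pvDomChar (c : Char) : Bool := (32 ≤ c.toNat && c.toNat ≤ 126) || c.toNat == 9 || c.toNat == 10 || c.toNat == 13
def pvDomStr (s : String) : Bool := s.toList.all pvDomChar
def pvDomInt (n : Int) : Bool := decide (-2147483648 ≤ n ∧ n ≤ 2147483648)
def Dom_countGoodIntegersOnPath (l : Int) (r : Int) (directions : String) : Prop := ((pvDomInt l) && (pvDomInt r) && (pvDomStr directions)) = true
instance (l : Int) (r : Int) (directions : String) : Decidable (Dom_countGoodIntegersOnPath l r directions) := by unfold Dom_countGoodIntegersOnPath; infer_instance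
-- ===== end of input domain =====

-- B replaces A's memoized top-down digit-DP recursion by bottom-up suffix-count tables
-- plus a single tight-prefix walk (objective: alternative, same cost).

-- ===== PORT A =====
-- pos = {0}; for m in directions: update cx,cy; pos.append(cx*4+cy); pos = set(pos)
def pvA_pos (directions : String) : PySem.Set Int :=
  PySem.Set.ofList
    ((directions.toList.foldl (fun (st : Int × Int × List Int) m =>
        let cx := if m = 'D' then st.1 + 1 else st.1
        let cy := if m = 'D' then st.2.1 else st.2.1 + 1
        (cx, cy, st.2.2 ++ [cx * 4 + cy])) (0, 0, [0])).2.2)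

-- nstr = str(n); nstr = "0"*(16-len(nstr)) + nstr; nls = [int(a) for a in nstr]
-- int(a) is (PySem.Int.ofChars? [a]).getD 0: `.getD 0` is reached only where Python raises
-- ValueError (a '-' char, i.e. n < 0), which Pre_ excludes.
def pvA_digits (n : Int) : List Int :=
  let nstr := PySem.Int.toChars n
  let nstr2 := List.replicate (16 - nstr.length) '0' ++ nstr
  nstr2.map (fun a => (PySem.Int.ofChars? [a]).getD 0)

-- @cache dp(idx,lstV,isLimit): the cache is a PySem.Dict keyed by the argument triple and
-- threaded through the loop; recursion on fuel = 16 - idx (the `idx == 16` base case).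
def pvA_dpM (pos : PySem.Set Int) (nls : List Int) :
    Nat → Nat → Int → Bool → PySem.Dict (Nat × Int × Bool) Int →
      Int × PySem.Dict (Nat × Int × Bool) Int
  | fuel, idx, lstV, isLimit, memo =>
    match PySem.Dict.get? memo (idx, lstV, isLimit) with
    | some res => (res, memo)
    | none =>
      match fuel with
      | 0 => (1, PySem.Dict.insert memo (idx, lstV, isLimit) 1)
      | fuel + 1 =>
        -- up = nls[idx] if isLimit else 9  (index in range under Pre_)
        let up : Int := if isLimit then PySem.List.pyGetD nls (idx : Int) 0 else 9
        let st := (PySem.List.pyRange 0 (up + 1) 1).foldl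
          (fun (st : Int × PySem.Dict (Nat × Int × Bool) Int) d =>
            if PySem.Set.contains pos (idx : Int) then
              (if lstV ≤ d then
                let p := pvA_dpM pos nls fuel (idx + 1) d (isLimit && decide (d = up)) st.2
                (st.1 + p.1, p.2)
              else st)
            else
              let p := pvA_dpM pos nls fuel (idx + 1) lstV (isLimit && decide (d = up)) st.2
              (st.1 + p.1, p.2)) (0, memo)
        (st.1, PySem.Dict.insert st.2 (idx, lstV, isLimit) st.1)

def pvA_count (pos : PySem.Set Int) (n : Int) : Int :=
  (pvA_dpM pos (pvA_digits n) 16 0 0 true PySem.Dict.empty).1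

def countGoodIntegersOnPath (l : Int) (r : Int) (directions : String) : Int :=
  let pos := pvA_pos directions
  pvA_count pos r - pvA_count pos (l - 1)

-- ===== PORT B =====
-- pos = {0}; built incrementally with set.add
def pvB_pos (directions : String) : PySem.Set Int :=
  (directions.toList.foldl (fun (st : Int × Int × PySem.Set Int) m =>
      let cx := if m = 'D' then st.1 + 1 else st.1
      let cy := if m = 'D' then st.2.1 else st.2.1 + 1
      (cx, cy, PySem.Set.add st.2.2 (cx * 4 + cy))) (0, 0, PySem.Set.ofList [0])).2.2

-- identical digit extraction as in Source B (same code line as in Source A)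
def pvB_digits (n : Int) : List Int :=
  let nstr := PySem.Int.toChars n
  let nstr2 := List.replicate (16 - nstr.length) '0' ++ nstr
  nstr2.map (fun a => (PySem.Int.ofChars? [a]).getD 0)

-- new=[]; acc=0; for x in reversed(free): acc+=x; new.append(acc); new.reverse()
def pvB_suffSums (free : List Int) : List Int :=
  ((free.reverse.foldl (fun (st : List Int × Int) x =>
      let acc := st.2 + x
      (st.1 ++ [acc], acc)) ([], 0)).1).reverse

-- tables = [free]; for i in range(15,-1,-1): ... tables.append(free); tables.reverse()
def pvB_tables (pos : PySem.Set Int) : List (List Int) :=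
  let free : List Int := List.replicate 10 1
  (((PySem.List.pyRange 15 (-1) (-1)).foldl (fun (st : List (List Int) × List Int) i =>
      let nf := if PySem.Set.contains pos i then pvB_suffSums st.2 else st.2.map (fun x => 10 * x)
      (st.1 ++ [nf], nf)) ([free], free)).1).reverse

-- def scan(i, v): ...  recursion on fuel = 16 - i (the `i == 16` base case)
def pvB_scan (pos : PySem.Set Int) (tables : List (List Int)) (digs : List Int) : Nat → Nat → Int → Int
  | 0, _, _ => 1
  | fuel + 1, i, v =>
    let d := PySem.List.pyGetD digs (i : Int) 0
    if !(PySem.Set.contains pos (i : Int)) then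
      d * PySem.List.pyGetD (PySem.List.pyGetD tables ((i : Int) + 1) []) v 0
        + pvB_scan pos tables digs fuel (i + 1) v
    else
      let t := ((PySem.List.pyRange v d 1).map (fun e =>
          PySem.List.pyGetD (PySem.List.pyGetD tables ((i : Int) + 1) []) e 0)).sum
      if d < v then t else t + pvB_scan pos tables digs fuel (i + 1) d

def pvB_count (pos : PySem.Set Int) (n : Int) : Int :=
  pvB_scan pos (pvB_tables pos) (pvB_digits n) 16 0 0

def countGoodIntegersOnPath_alt (l : Int) (r : Int) (directions : String) : Int :=
  let pos := pvB_pos directions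
  pvB_count pos r - pvB_count pos (l - 1)

-- ===== PRECONDITION & SPEC =====
-- Pre_ excludes exactly the inputs where A raises: for l ≤ 0 or r < 0 the padded string
-- "0"*(16-len)+str(n) contains '-', and int('-') raises ValueError (B raises there too).
def Pre_countGoodIntegersOnPath (l : Int) (r : Int) (_directions : String) : Prop :=
  1 ≤ l ∧ 0 ≤ r

instance (l : Int) (r : Int) (directions : String) : Decidable (Pre_countGoodIntegersOnPath l r directions) := by
  unfold Pre_countGoodIntegersOnPath; infer_instance

def pvWitness_countGoodIntegersOnPath : Int × Int × String := (1, 12, "D")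

def Spec_countGoodIntegersOnPath (l : Int) (r : Int) (directions : String) (out : Int) : Prop := out = countGoodIntegersOnPath_alt l r directions
instance (l : Int) (r : Int) (directions : String) (out : Int) : Decidable (Spec_countGoodIntegersOnPath l r directions out) := by unfold Spec_countGoodIntegersOnPath; infer_instance

-- ===== CLAIM (what is proved, stated in full; the proofs are below) =====
def Claim_equal_countGoodIntegersOnPath : Prop := ∀ (l : Int) (r : Int) (directions : String), Dom_countGoodIntegersOnPath l r directions → Pre_countGoodIntegersOnPath l r directions → Spec_countGoodIntegersOnPath l r directions (countGoodIntegersOnPath l r directions)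

-- ===== LEMMAS AND PROOFS =====

-- the cache-free recursion the memoised port computes
def pvA_dp (pos : PySem.Set Int) (nls : List Int) : Nat → Nat → Int → Bool → Int
  | 0, _, _, _ => 1
  | fuel + 1, idx, lstV, isLimit =>
    let up : Int := if isLimit then PySem.List.pyGetD nls (idx : Int) 0 else 9
    (PySem.List.pyRange 0 (up + 1) 1).foldl (fun res d =>
      if PySem.Set.contains pos (idx : Int) then
        (if lstV ≤ d then res + pvA_dp pos nls fuel (idx + 1) d (isLimit && decide (d = up)) else res)
      else res + pvA_dp pos nls fuel (idx + 1) lstV (isLimit && decide (d = up))) 0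

-- every cached value is the cache-free dp value at its key
def MemoSound (pos : PySem.Set Int) (nls : List Int)
    (memo : PySem.Dict (Nat × Int × Bool) Int) : Prop :=
  ∀ i v b r, PySem.Dict.get? memo (i, v, b) = some r → r = pvA_dp pos nls (16 - i) i v b

theorem memoSound_insert (pos : PySem.Set Int) (nls : List Int)
    (memo : PySem.Dict (Nat × Int × Bool) Int) (hm : MemoSound pos nls memo)
    (i : Nat) (v : Int) (b : Bool) (r : Int) (hr : r = pvA_dp pos nls (16 - i) i v b) :
    MemoSound pos nls (PySem.Dict.insert memo (i, v, b) r) := by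
  intro i' v' b' r' hget
  by_cases hk : (i', v', b') = (i, v, b)
  · have h1 : i' = i := congrArg Prod.fst hk
    have h2 : v' = v := congrArg (fun t => t.2.1) hk
    have h3 : b' = b := congrArg (fun t => t.2.2) hk
    subst h1; subst h2; subst h3
    rw [PySem.Dict.get?_insert_self] at hget
    injection hget with h
    rw [← h]; exact hr
  · rw [PySem.Dict.get?_insert_of_ne memo r hk] at hget
    exact hm i' v' b' r' hget

-- a state-threading foldl whose first component follows a pure foldl and whose
-- second component preserves an invariant
theorem foldl_memo {σ : Type} (P : σ → Prop) (f : Int × σ → Int → Int × σ)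
    (g : Int → Int → Int)
    (hstep : ∀ acc m d, P m → (f (acc, m) d).1 = g acc d ∧ P (f (acc, m) d).2) :
    ∀ (l : List Int) (acc : Int) (m : σ), P m →
      (l.foldl f (acc, m)).1 = l.foldl g acc ∧ P (l.foldl f (acc, m)).2 := by
  intro l
  induction l with
  | nil => intro acc m hm; exact ⟨rfl, hm⟩
  | cons d tl ihl =>
    intro acc m hm
    obtain ⟨h1, h2⟩ := hstep acc m d hm
    rw [List.foldl_cons, List.foldl_cons,
      show f (acc, m) d = (g acc d, (f (acc, m) d).2) from Prod.ext_iff.mpr ⟨h1, rfl⟩]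
    exact ihl (g acc d) _ h2

theorem pvA_dpM_correct (pos : PySem.Set Int) (nls : List Int) :
    ∀ fuel idx (v : Int) (lim : Bool) memo, fuel + idx = 16 → MemoSound pos nls memo →
      (pvA_dpM pos nls fuel idx v lim memo).1 = pvA_dp pos nls fuel idx v lim ∧
        MemoSound pos nls (pvA_dpM pos nls fuel idx v lim memo).2 := by
  intro fuel
  induction fuel with
  | zero =>
    intro idx v lim memo hfi hm
    rw [pvA_dpM]
    cases hg : PySem.Dict.get? memo (idx, v, lim) with
    | some r =>
      refine ⟨?_, hm⟩
      have := hm idx v lim r hg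
      rw [show 16 - idx = 0 from by omega] at this
      simpa [pvA_dp] using this
    | none =>
      refine ⟨rfl, ?_⟩
      exact memoSound_insert pos nls memo hm idx v lim 1
        (by rw [show 16 - idx = 0 from by omega]; rfl)
  | succ fuel ih =>
    intro idx v lim memo hfi hm
    rw [pvA_dpM]
    cases hg : PySem.Dict.get? memo (idx, v, lim) with
    | some r =>
      refine ⟨?_, hm⟩
      have := hm idx v lim r hg
      rw [show 16 - idx = fuel + 1 from by omega] at this
      simpa using this
    | none =>
      simp only
      set up : Int := if lim then PySem.List.pyGetD nls (idx : Int) 0 else 9 with hup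
      obtain ⟨h1, h2⟩ := foldl_memo (MemoSound pos nls)
        (fun (st : Int × PySem.Dict (Nat × Int × Bool) Int) d =>
          if PySem.Set.contains pos (idx : Int) then
            (if v ≤ d then
              let p := pvA_dpM pos nls fuel (idx + 1) d (lim && decide (d = up)) st.2
              (st.1 + p.1, p.2)
            else st)
          else
            let p := pvA_dpM pos nls fuel (idx + 1) v (lim && decide (d = up)) st.2
            (st.1 + p.1, p.2))
        (fun res d =>
          if PySem.Set.contains pos (idx : Int) then
            (if v ≤ d then res + pvA_dp pos nls fuel (idx + 1) d (lim && decide (d = up))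
             else res)
          else res + pvA_dp pos nls fuel (idx + 1) v (lim && decide (d = up)))
        (fun acc m d hmS => by
          cases hc : PySem.Set.contains pos (idx : Int) with
          | true =>
            simp only [if_true]
            by_cases hvd : v ≤ d
            · simp only [if_pos hvd]
              obtain ⟨ha, hb⟩ := ih (idx + 1) d (lim && decide (d = up)) m (by omega) hmS
              exact ⟨by rw [ha], hb⟩
            · simp only [if_neg hvd]
              exact ⟨by trivial, hmS⟩
          | false =>
            simp only [Bool.false_eq_true, if_false]
            obtain ⟨ha, hb⟩ := ih (idx + 1) v (lim && decide (d = up)) m (by omega) hmS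
            exact ⟨by rw [ha], hb⟩)
        (PySem.List.pyRange 0 (up + 1) 1) 0 memo hm
      constructor
      · rw [h1, pvA_dp]
      · exact memoSound_insert pos nls _ h2 idx v lim _
          (by rw [h1, show 16 - idx = fuel + 1 from by omega, pvA_dp])

theorem pvA_count_eq_dp (pos : PySem.Set Int) (n : Int) :
    pvA_count pos n = pvA_dp pos (pvA_digits n) 16 0 0 true := by
  rw [pvA_count]
  exact (pvA_dpM_correct pos (pvA_digits n) 16 0 0 true PySem.Dict.empty rfl
    (fun i v b r h => by rw [PySem.Dict.get?_empty] at h; cases h)).1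

-- The common mathematical skeleton: `Free pos fuel idx v` is the number of completions of
-- positions idx..15 with no upper bound, `Tight pos nls fuel idx v` the bounded count.
def Free (pos : PySem.Set Int) : Nat → Nat → Int → Int
  | 0, _, _ => 1
  | fuel + 1, idx, v =>
    if PySem.Set.contains pos (idx : Int) then
      ((PySem.List.pyRange v 10 1).map (Free pos fuel (idx + 1))).sum
    else 10 * Free pos fuel (idx + 1) v

def Tight (pos : PySem.Set Int) (nls : List Int) : Nat → Nat → Int → Int
  | 0, _, _ => 1
  | fuel + 1, idx, v =>
    let d := PySem.List.pyGetD nls (idx : Int) 0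
    if PySem.Set.contains pos (idx : Int) then
      ((PySem.List.pyRange v d 1).map (Free pos fuel (idx + 1))).sum
        + (if v ≤ d then Tight pos nls fuel (idx + 1) d else 0)
    else d * Free pos fuel (idx + 1) v + Tight pos nls fuel (idx + 1) v

def rowSpec (pos : PySem.Set Int) (j : Nat) : List Int :=
  (PySem.List.pyRange 0 10 1).map (Free pos (16 - j) j)

def tablesSpec (pos : PySem.Set Int) : List (List Int) :=
  (List.range 17).map (rowSpec pos)

-- generic foldl helpers
theorem foldl_skip {v : Int} (g : Int → Int) (s : Int) (l : List Int)
    (h : ∀ d ∈ l, ¬ v ≤ d) :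
    l.foldl (fun res d => if v ≤ d then res + g d else res) s = s := by
  induction l generalizing s with
  | nil => rfl
  | cons a tl ih =>
    simp only [List.foldl_cons, if_neg (h a (by simp))]
    exact ih s (fun d hd => h d (by simp [hd]))

theorem foldl_threshold (g : Int → Int) (s : Int) (a b v : Int) (hav : a ≤ v) :
    (PySem.List.pyRange a b 1).foldl (fun res d => if v ≤ d then res + g d else res) s
      = s + ((PySem.List.pyRange v b 1).map g).sum := by
  by_cases hvb : v ≤ b
  · rw [show PySem.List.pyRange a b 1 = PySem.List.pyRange a b from rfl,
      PySem.List.pyRange_one_append a v b hav hvb, List.foldl_append]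
    rw [foldl_skip g s _ (fun d hd => by
      rw [PySem.List.mem_pyRange_one] at hd; omega)]
    rw [PySem.List.foldl_congr_mem _ _ (fun res d => res + g d) s
      (fun acc x hx => by
        rw [PySem.List.mem_pyRange_one] at hx
        rw [if_pos hx.1])]
    exact PySem.List.foldl_add _ g s
  · rw [foldl_skip g s _ (fun d hd => by
      rw [PySem.List.mem_pyRange_one] at hd; omega)]
    rw [show PySem.List.pyRange v b 1 = [] from PySem.List.pyRange_one_eq_nil (by omega)]
    simp

-- A-side: the unlimited branch equals Free
theorem pvA_dp_false (pos : PySem.Set Int) (nls : List Int) :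
    ∀ fuel idx (v : Int), 0 ≤ v → pvA_dp pos nls fuel idx v false = Free pos fuel idx v := by
  intro fuel
  induction fuel with
  | zero => intro idx v _; rfl
  | succ fuel ih =>
    intro idx v hv
    rw [pvA_dp, Free]
    simp only [Bool.false_and, Bool.false_eq_true, if_false]
    cases h : PySem.Set.contains pos (idx : Int) with
    | true =>
      simp only [if_true]
      rw [PySem.List.foldl_congr_mem _ _
        (fun res d => if v ≤ d then res + Free pos fuel (idx + 1) d else res) 0
        (fun acc x hx => by
          rw [PySem.List.mem_pyRange_one] at hx
          by_cases hvx : v ≤ x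
          · simp only [if_pos hvx, ih (idx + 1) x (by omega)]
          · simp only [if_neg hvx])]
      rw [show (9 : Int) + 1 = 10 from rfl, foldl_threshold _ 0 0 10 v hv, zero_add]
    | false =>
      simp only [Bool.false_eq_true, if_false]
      rw [PySem.List.foldl_congr_mem _ _
        (fun res _ => res + Free pos fuel (idx + 1) v) 0
        (fun acc x _ => by simp only [ih (idx + 1) v hv])]
      rw [PySem.List.foldl_add _ (fun _ => Free pos fuel (idx + 1) v) 0,
        PySem.List.sum_map_const_int]
      rw [show (PySem.List.pyRange 0 (9 + 1) 1).length = 10 from by decide]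
      ring

-- A-side: the limited branch equals Tight
theorem pvA_dp_true (pos : PySem.Set Int) (nls : List Int)
    (hlen : nls.length = 16) (hdig : ∀ x ∈ nls, 0 ≤ x ∧ x ≤ 9) :
    ∀ fuel idx (v : Int), fuel + idx = 16 → 0 ≤ v →
      pvA_dp pos nls fuel idx v true = Tight pos nls fuel idx v := by
  intro fuel
  induction fuel with
  | zero => intro idx v _ _; rfl
  | succ fuel ih =>
    intro idx v hfi hv
    have hidx : idx < 16 := by omega
    have hmem : PySem.List.pyGetD nls (idx : Int) 0 ∈ nls := by
      apply PySem.List.pyGetD_mem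
      simp [PySem.Raise.InRange, hlen]; omega
    obtain ⟨hd0, hd9⟩ := hdig _ hmem
    set d : Int := PySem.List.pyGetD nls (idx : Int) 0 with hddef
    rw [pvA_dp, Tight]
    simp only [Bool.true_and, if_true, ← hddef]
    rw [PySem.List.pyRange_one_succ_right hd0, List.foldl_append]
    cases h : PySem.Set.contains pos (idx : Int) with
    | true =>
      simp only [if_true]
      rw [PySem.List.foldl_congr_mem _ _
        (fun res e => if v ≤ e then res + Free pos fuel (idx + 1) e else res) 0
        (fun acc x hx => by
          rw [PySem.List.mem_pyRange_one] at hx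
          have hxd : ¬ (x = d) := by omega
          by_cases hvx : v ≤ x
          · simp only [decide_eq_false hxd,  if_pos hvx,
              pvA_dp_false pos nls fuel (idx + 1) x (by omega)]
          · simp only [if_neg hvx])]
      rw [foldl_threshold _ 0 0 d v hv, zero_add]
      simp only [List.foldl_cons, List.foldl_nil, decide_true]
      by_cases hvd : v ≤ d
      · rw [if_pos hvd, if_pos hvd, ih (idx + 1) d (by omega) hd0]
      · rw [if_neg hvd, if_neg hvd]
        rw [show PySem.List.pyRange v d 1 = [] from PySem.List.pyRange_one_eq_nil (by omega)]
        simp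
    | false =>
      simp only [Bool.false_eq_true, if_false]
      rw [PySem.List.foldl_congr_mem _ _
        (fun res _ => res + Free pos fuel (idx + 1) v) 0
        (fun acc x hx => by
          rw [PySem.List.mem_pyRange_one] at hx
          have hxd : ¬ (x = d) := by omega
          simp only [decide_eq_false hxd, 
            pvA_dp_false pos nls fuel (idx + 1) v hv])]
      rw [PySem.List.foldl_add _ (fun _ => Free pos fuel (idx + 1) v) 0,
        PySem.List.sum_map_const_int]
      simp only [List.foldl_cons, List.foldl_nil, decide_true]
      rw [PySem.List.length_pyRange_one]
      rw [ih (idx + 1) v (by omega) hv]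
      have : ((d - 0).toNat : Int) = d := by omega
      rw [this]
      ring

-- the suffix-sum loop of Source B, evaluated on a ten-element list
theorem suffSums_ten (a0 a1 a2 a3 a4 a5 a6 a7 a8 a9 : Int) :
    pvB_suffSums [a0, a1, a2, a3, a4, a5, a6, a7, a8, a9] =
      [0 + a9 + a8 + a7 + a6 + a5 + a4 + a3 + a2 + a1 + a0,
       0 + a9 + a8 + a7 + a6 + a5 + a4 + a3 + a2 + a1,
       0 + a9 + a8 + a7 + a6 + a5 + a4 + a3 + a2,
       0 + a9 + a8 + a7 + a6 + a5 + a4 + a3,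
       0 + a9 + a8 + a7 + a6 + a5 + a4,
       0 + a9 + a8 + a7 + a6 + a5,
       0 + a9 + a8 + a7 + a6,
       0 + a9 + a8 + a7,
       0 + a9 + a8,
       0 + a9] := rfl

theorem range10 : PySem.List.pyRange 0 10 1 = [0, 1, 2, 3, 4, 5, 6, 7, 8, 9] := by decide

-- B-side: the suffix-sum step produces the next Free row
theorem rowSpec_step (pos : PySem.Set Int) (j : Nat) (hj : j ≤ 15) :
    (if PySem.Set.contains pos (j : Int) then pvB_suffSums (rowSpec pos (j + 1))
     else (rowSpec pos (j + 1)).map (fun x => 10 * x)) = rowSpec pos j := by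
  have h16 : 16 - j = (15 - j) + 1 := by omega
  have h15 : 16 - (j + 1) = 15 - j := by omega
  rw [rowSpec, rowSpec, h16, h15, range10]
  cases h : PySem.Set.contains pos (j : Int) with
  | true =>
    simp only [if_true, List.map_cons, List.map_nil, suffSums_ten]
    simp only [Free, h, if_true]
    rw [show PySem.List.pyRange (0:Int) 10 1 = [0,1,2,3,4,5,6,7,8,9] from range10,
      show PySem.List.pyRange (1:Int) 10 1 = [1,2,3,4,5,6,7,8,9] from by decide,
      show PySem.List.pyRange (2:Int) 10 1 = [2,3,4,5,6,7,8,9] from by decide,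
      show PySem.List.pyRange (3:Int) 10 1 = [3,4,5,6,7,8,9] from by decide,
      show PySem.List.pyRange (4:Int) 10 1 = [4,5,6,7,8,9] from by decide,
      show PySem.List.pyRange (5:Int) 10 1 = [5,6,7,8,9] from by decide,
      show PySem.List.pyRange (6:Int) 10 1 = [6,7,8,9] from by decide,
      show PySem.List.pyRange (7:Int) 10 1 = [7,8,9] from by decide,
      show PySem.List.pyRange (8:Int) 10 1 = [8,9] from by decide,
      show PySem.List.pyRange (9:Int) 10 1 = [9] from by decide]
    simp only [List.map_cons, List.map_nil, List.sum_cons, List.sum_nil, List.cons.injEq,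
      and_true]
    refine ⟨by omega, by omega, by omega, by omega, by omega, by omega, by omega, by omega,
      by omega, by omega⟩
  | false =>
    simp only [Bool.false_eq_true, if_false, List.map_cons, List.map_nil]
    simp only [Free, h, Bool.false_eq_true, if_false]

-- descending integer list k-1, k-2, …, 0
def listDesc : Nat → List Int
  | 0 => []
  | k + 1 => (k : Int) :: listDesc k

theorem pvB_tables_fold (pos : PySem.Set Int) :
    ∀ k, k ≤ 16 → ∀ acc : List (List Int),
      ((listDesc k).foldl (fun (st : List (List Int) × List Int) i =>
          let nf := if PySem.Set.contains pos i then pvB_suffSums st.2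
                    else st.2.map (fun x => 10 * x)
          (st.1 ++ [nf], nf)) (acc, rowSpec pos k)).1
        = acc ++ ((List.range k).reverse.map (rowSpec pos)) := by
  intro k
  induction k with
  | zero => intro _ acc; simp [listDesc]
  | succ k ih =>
    intro hk acc
    have hstep := rowSpec_step pos k (by omega)
    simp only [listDesc, List.foldl_cons]
    rw [show ((k : Nat) : Int) = (k : Int) from rfl]
    simp only [hstep]
    rw [ih (by omega) (acc ++ [rowSpec pos k])]
    simp [List.range_succ]

theorem rowSpec_sixteen (pos : PySem.Set Int) : rowSpec pos 16 = List.replicate 10 1 := by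
  rw [rowSpec, range10]
  simp [Free, List.replicate]

-- B-side: the tables fold builds exactly the Free rows
theorem pvB_tables_eq (pos : PySem.Set Int) : pvB_tables pos = tablesSpec pos := by
  rw [pvB_tables]
  have hdesc : PySem.List.pyRange 15 (-1) (-1) = listDesc 16 := by decide
  rw [hdesc, show List.replicate 10 (1:Int) = rowSpec pos 16 from (rowSpec_sixteen pos).symm]
  rw [pvB_tables_fold pos 16 le_rfl [rowSpec pos 16]]
  rw [tablesSpec]
  simp [List.range_succ]

-- lookup into the spec tables
theorem tablesSpec_get (pos : PySem.Set Int) (j : Nat) (hj : j < 17) (e : Int)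
    (he0 : 0 ≤ e) (he9 : e ≤ 9) :
    PySem.List.pyGetD (PySem.List.pyGetD (tablesSpec pos) (j : Int) []) e 0
      = Free pos (16 - j) j e := by
  rw [PySem.List.pyGetD_natCast, tablesSpec]
  rw [PySem.List.getD_map_range (rowSpec pos) 17 j [] hj, rowSpec]
  rw [PySem.List.pyGetD_map_pyRange_of_nonneg _ 10 e 0 he0 (by omega)]

-- B-side: the scan over the spec tables equals Tight
theorem pvB_scan_eq (pos : PySem.Set Int) (digs : List Int)
    (hlen : digs.length = 16) (hdig : ∀ x ∈ digs, 0 ≤ x ∧ x ≤ 9) :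
    ∀ fuel i (v : Int), fuel + i = 16 → 0 ≤ v → v ≤ 9 →
      pvB_scan pos (tablesSpec pos) digs fuel i v = Tight pos digs fuel i v := by
  intro fuel
  induction fuel with
  | zero => intro i v _ _ _; rfl
  | succ fuel ih =>
    intro i v hfi hv hv9
    have hi : i < 16 := by omega
    have hmem : PySem.List.pyGetD digs (i : Int) 0 ∈ digs := by
      apply PySem.List.pyGetD_mem
      simp [PySem.Raise.InRange, hlen]; omega
    obtain ⟨hd0, hd9⟩ := hdig _ hmem
    set d : Int := PySem.List.pyGetD digs (i : Int) 0 with hddef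
    have hcast : ((i : Int) + 1) = ((i + 1 : Nat) : Int) := by push_cast; ring
    have hfree : 16 - (i + 1) = fuel := by omega
    rw [pvB_scan, Tight]
    simp only [← hddef, hcast]
    cases h : PySem.Set.contains pos (i : Int) with
    | false =>
      simp only [Bool.not_false, if_true, Bool.false_eq_true, if_false]
      rw [tablesSpec_get pos (i + 1) (by omega) v hv hv9, hfree, ih (i + 1) v (by omega) hv hv9]
    | true =>
      simp only [Bool.not_true, Bool.false_eq_true, if_false, if_true]
      have hmap : (PySem.List.pyRange v d 1).map (fun e =>
            PySem.List.pyGetD (PySem.List.pyGetD (tablesSpec pos) ((i + 1 : Nat) : Int) []) e 0)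
          = (PySem.List.pyRange v d 1).map (Free pos fuel (i + 1)) := by
        refine List.map_congr_left (fun e he => ?_)
        rw [PySem.List.mem_pyRange_one] at he
        rw [tablesSpec_get pos (i + 1) (by omega) e (by omega) (by omega), hfree]
      by_cases hdv : d < v
      · rw [if_pos hdv, if_neg (by omega),
          show PySem.List.pyRange v d 1 = [] from PySem.List.pyRange_one_eq_nil (by omega)]
        simp
      · rw [if_neg hdv, if_pos (by omega), hmap, ih (i + 1) d (by omega) hd0 hd9]

-- every character pushed by Nat.toDigitsCore 10 maps to a digit value in [0, 9]
theorem toDigitsCore_digits (P : Char → Prop)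
    (hP : ∀ k : Nat, k < 10 → P (Nat.digitChar k)) :
    ∀ (f n : Nat) (acc : List Char), (∀ c ∈ acc, P c) →
      ∀ c ∈ Nat.toDigitsCore 10 f n acc, P c := by
  intro f
  induction f with
  | zero => intro n acc hacc c hc; exact hacc c hc
  | succ f ih =>
    intro n acc hacc c hc
    simp only [Nat.toDigitsCore] at hc
    by_cases hnb : n / 10 = 0
    · rw [if_pos hnb] at hc
      rcases List.mem_cons.mp hc with hc2 | hc2
      · exact hc2 ▸ hP _ (Nat.mod_lt _ (by norm_num))
      · exact hacc c hc2
    · rw [if_neg hnb] at hc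
      refine ih (n / 10) _ ?_ c hc
      intro c' hc'
      rcases List.mem_cons.mp hc' with hc2 | hc2
      · exact hc2 ▸ hP _ (Nat.mod_lt _ (by norm_num))
      · exact hacc c' hc2

-- digits facts
theorem pvA_digits_spec (n : Int) (h0 : 0 ≤ n) (h1 : n ≤ 2147483648) :
    (pvA_digits n).length = 16 ∧ ∀ x ∈ pvA_digits n, 0 ≤ x ∧ x ≤ 9 := by
  have htc : PySem.Int.toChars n = Nat.toDigits 10 n.toNat := by
    rw [PySem.Int.toChars, if_neg (by omega)]
  have hlen : (Nat.toDigits 10 n.toNat).length ≤ 16 := by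
    refine Nat.toDigits_length 10 n.toNat 16 (by norm_num) ?_
    have : n.toNat ≤ 2147483648 := by omega
    omega
  have hchars : ∀ c ∈ Nat.toDigits 10 n.toNat,
      0 ≤ (PySem.Int.ofChars? [c]).getD 0 ∧ (PySem.Int.ofChars? [c]).getD 0 ≤ 9 := by
    intro c hc
    refine toDigitsCore_digits (fun c => 0 ≤ (PySem.Int.ofChars? [c]).getD 0 ∧
      (PySem.Int.ofChars? [c]).getD 0 ≤ 9) ?_ _ _ [] (by simp) c hc
    intro k hk
    interval_cases k <;> exact ⟨by decide, by decide⟩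
  constructor
  · rw [pvA_digits]
    simp only [List.length_map, List.length_append, List.length_replicate, htc]
    omega
  · intro x hx
    rw [pvA_digits] at hx
    simp only [List.mem_map, List.mem_append, List.mem_replicate] at hx
    obtain ⟨c, hc | hc, rfl⟩ := hx
    · rw [hc.2]; exact ⟨by decide, by decide⟩
    · exact hchars c (htc ▸ hc)

theorem pvB_pos_fold (ms : List Char) :
    ∀ (cx cy : Int) (lst : List Int),
      (ms.foldl (fun (st : Int × Int × PySem.Set Int) m =>
          let cx := if m = 'D' then st.1 + 1 else st.1
          let cy := if m = 'D' then st.2.1 else st.2.1 + 1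
          (cx, cy, PySem.Set.add st.2.2 (cx * 4 + cy))) (cx, cy, PySem.Set.ofList lst)).2.2
        = PySem.Set.ofList
          ((ms.foldl (fun (st : Int × Int × List Int) m =>
              let cx := if m = 'D' then st.1 + 1 else st.1
              let cy := if m = 'D' then st.2.1 else st.2.1 + 1
              (cx, cy, st.2.2 ++ [cx * 4 + cy])) (cx, cy, lst)).2.2) := by
  induction ms with
  | nil => intro cx cy lst; rfl
  | cons m tl ih =>
    intro cx cy lst
    simp only [List.foldl_cons]
    rw [show PySem.Set.add (PySem.Set.ofList lst)
        ((if m = 'D' then cx + 1 else cx) * 4 + (if m = 'D' then cy else cy + 1))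
      = PySem.Set.ofList (lst ++ [(if m = 'D' then cx + 1 else cx) * 4 +
          (if m = 'D' then cy else cy + 1)]) from
      (PySem.Set.ofList_append_singleton _ _).symm]
    exact ih _ _ _

theorem pvB_pos_eq (directions : String) : pvB_pos directions = pvA_pos directions := by
  rw [pvB_pos, pvA_pos]
  rw [show (PySem.Set.ofList [0] : PySem.Set Int) = PySem.Set.ofList [(0:Int)] from rfl]
  exact pvB_pos_fold directions.toList 0 0 [0]

theorem count_eq (pos : PySem.Set Int) (n : Int) (h0 : 0 ≤ n) (h1 : n ≤ 2147483648) :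
    pvA_count pos n = pvB_count pos n := by
  obtain ⟨hlen, hdig⟩ := pvA_digits_spec n h0 h1
  have hBd : pvB_digits n = pvA_digits n := rfl
  rw [pvA_count_eq_dp, pvB_count, hBd, pvB_tables_eq]
  rw [pvA_dp_true pos _ hlen hdig 16 0 0 rfl le_rfl]
  rw [pvB_scan_eq pos _ hlen hdig 16 0 0 rfl le_rfl (by norm_num)]

-- ===== VERDICT (by name: the statement is the Claim_ definition above) =====
theorem countGoodIntegersOnPath_spec : Claim_equal_countGoodIntegersOnPath := by
  intro l r directions hdom hpre
  unfold Spec_countGoodIntegersOnPath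
  unfold Dom_countGoodIntegersOnPath at hdom
  simp only [pvDomInt, Bool.and_eq_true, decide_eq_true_eq] at hdom
  obtain ⟨⟨hl, hr⟩, -⟩ := hdom
  obtain ⟨hl1, hr0⟩ := hpre
  simp only [countGoodIntegersOnPath, countGoodIntegersOnPath_alt]
  rw [pvB_pos_eq]
  rw [count_eq _ r hr0 (by omega), count_eq _ (l - 1) (by omega) (by omega)]
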